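-- pv_equiv track=rewrite | github.com/harrifeng/svg-in-action | python/util.py | get_color_arr
-- ===== SOURCE A (Python) =====
-- def get_color_arr(sum, size=2):
--     ret = []
--     rgb = ('#d9534f',
--            '#5cb85c',
--            '#428bca')
--
--     # rgb = ('#A',
--     #        '#B',
--     #        '#C')
--
--     lev = 0
--     total = 1
--     for i in range(1, sum + 1):
--         ret.append(rgb[lev % 3])
--         if i == total:
--             lev += 1
--             total += size ** lev
--     return ret
-- ===== SOURCE B (Python) =====
-- def get_color_arr(sum, size=2):
--     rgb = ('#d9534f',
--            '#5cb85c',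
--            '#428bca')
--     ret = []
--     remaining = sum
--     lev = 0
--     while remaining > 0:
--         n = min(size ** lev, remaining)
--         ret.extend([rgb[lev % 3]] * n)
--         remaining -= n
--         lev += 1
--     return ret
-- ===== Notes on version B (the rewrite author's own statement) =====
-- stated objective: simpler
-- what changed: Replaces the per-element loop with a threshold counter by a per-level loop that appends each level's whole block of size**lev colors at once via list repetition.
-- outside the precondition, e.g. on get_color_arr(2, -1): A returns ['#d9534f', '#5cb85c'], B does not finish within the time limit
import Mathlib
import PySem

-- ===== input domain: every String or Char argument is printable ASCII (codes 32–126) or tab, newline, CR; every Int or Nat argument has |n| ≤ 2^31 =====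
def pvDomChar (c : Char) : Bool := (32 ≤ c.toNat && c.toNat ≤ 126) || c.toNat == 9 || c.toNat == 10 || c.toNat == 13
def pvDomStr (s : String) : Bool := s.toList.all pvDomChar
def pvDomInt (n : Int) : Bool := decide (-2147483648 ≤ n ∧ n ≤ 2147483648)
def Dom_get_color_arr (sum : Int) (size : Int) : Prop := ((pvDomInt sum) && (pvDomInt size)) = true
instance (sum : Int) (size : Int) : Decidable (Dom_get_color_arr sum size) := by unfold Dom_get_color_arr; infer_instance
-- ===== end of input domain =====

-- B builds the same list level-block by level-block (ret.extend([rgb[lev%3]] * n)) instead of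
-- A's element-at-a-time loop with a threshold counter; objective: simpler decomposition.

-- ===== PORT A =====
-- rgb[k] for k = lev % 3 ∈ {0,1,2}
def pvA_rgb (k : Int) : String :=
  if k = 0 then "#d9534f" else if k = 1 then "#5cb85c" else "#428bca"

-- one iteration of A's for-body over state (ret, lev, total); 'size ** lev' with lev ≥ 1 here,
-- ported as size ^ (lev+1).toNat (lev stays ≥ 0 throughout, so .toNat is exact)
def pvA_step (size : Int) (st : List String × Int × Int) (i : Int) : List String × Int × Int :=
  let ret := st.1 ++ [pvA_rgb (st.2.1 % 3)]
  if i = st.2.2 then (ret, st.2.1 + 1, st.2.2 + size ^ (st.2.1 + 1).toNat)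
  else (ret, st.2.1, st.2.2)

def get_color_arr (sum : Int) (size : Int) : List String :=
  ((PySem.List.pyRange 1 (sum + 1) 1).foldl (pvA_step size) ([], 0, 1)).1

-- ===== PORT B =====
def pvB_rgb (k : Int) : String :=
  if k = 0 then "#d9534f" else if k = 1 then "#5cb85c" else "#428bca"

-- B's while-loop; fuel makes it total in Lean (under Pre_ each pass removes n ≥ 1, so
-- fuel = sum.toNat is enough and is never exhausted)
def pvB_loop (size : Int) : Nat → Int → Int → List String → List String
  | 0, _, _, acc => acc
  | fuel + 1, remaining, lev, acc =>
    if remaining > 0 then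
      let n := min (size ^ lev.toNat) remaining
      pvB_loop size fuel (remaining - n) (lev + 1)
        (acc ++ List.replicate n.toNat (pvB_rgb (lev % 3)))
    else acc

def get_color_arr_alt (sum : Int) (size : Int) : List String :=
  pvB_loop size sum.toNat sum 0 []

-- ===== PRECONDITION & SPEC =====
-- Pre_ restricts to the natural domain of a positive block-growth factor (plus the trivial
-- lists of length ≤ 1, where size is irrelevant): for size ≤ 0 with sum ≥ 2 the Python A still
-- returns a degenerate list stuck at level 1, while B's block loop either does not terminate
-- (size 0 or -1) or produces a different block pattern (size ≤ -2), so those inputs are excluded.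
def Pre_get_color_arr (sum : Int) (size : Int) : Prop := 1 ≤ size ∨ sum ≤ 1
instance (sum : Int) (size : Int) : Decidable (Pre_get_color_arr sum size) := by
  unfold Pre_get_color_arr; infer_instance

def pvWitness_get_color_arr : Int × Int := (5, 2)

def Spec_get_color_arr (sum : Int) (size : Int) (out : List String) : Prop := out = get_color_arr_alt sum size
instance (sum : Int) (size : Int) (out : List String) : Decidable (Spec_get_color_arr sum size out) := by unfold Spec_get_color_arr; infer_instance

-- ===== CLAIM (what is proved, stated in full; the proofs are below) =====
def Claim_equal_get_color_arr : Prop := ∀ (sum : Int) (size : Int), Dom_get_color_arr sum size → Pre_get_color_arr sum size → Spec_get_color_arr sum size (get_color_arr sum size)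

-- ===== LEMMAS AND PROOFS =====

-- recursive view of A's loop: n iterations remaining, current index i, state (lev, total)
def pvA_run (size : Int) : Nat → Int → Int → Int → List String
  | 0, _, _, _ => []
  | n + 1, i, lev, total =>
    pvA_rgb (lev % 3) ::
      (if i = total then pvA_run size n (i + 1) (lev + 1) (total + size ^ (lev + 1).toNat)
       else pvA_run size n (i + 1) lev total)

theorem pvA_fold_run (size : Int) :
    ∀ (n : Nat) (i lev total : Int) (acc : List String),
      ((PySem.List.pyRange i (i + n) 1).foldl (pvA_step size) (acc, lev, total)).1
        = acc ++ pvA_run size n i lev total := by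
  intro n
  induction n with
  | zero => intro i lev total acc; simp [PySem.List.pyRange_one_eq_nil, pvA_run]
  | succ m ih =>
    intro i lev total acc
    have hlt : i < i + (m + 1 : Nat) := by omega
    rw [PySem.List.pyRange_one_cons hlt]
    have harg : i + ((m : Int) + 1) = (i + 1) + m := by ring
    push_cast
    rw [harg]
    simp only [List.foldl_cons, pvA_step, pvA_run]
    by_cases h : i = total
    · simp [h, ih]
    · simp [h, ih]

theorem pvB_loop_nonpos (size : Int) (fuel : Nat) (r lev : Int) (acc : List String)
    (h : ¬ r > 0) : pvB_loop size fuel r lev acc = acc := by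
  cases fuel with
  | zero => rfl
  | succ f => simp [pvB_loop, h]

theorem pvB_loop_acc (size : Int) :
    ∀ (fuel : Nat) (r lev : Int) (acc : List String),
      pvB_loop size fuel r lev acc = acc ++ pvB_loop size fuel r lev [] := by
  intro fuel
  induction fuel with
  | zero => intro r lev acc; simp [pvB_loop]
  | succ f ih =>
    intro r lev acc
    by_cases h : r > 0
    · simp only [pvB_loop, if_pos h]
      rw [ih _ _ (acc ++ _), ih _ _ ([] ++ _)]
      simp
    · simp [pvB_loop, h]

-- one block of A: b elements remain in the current level (total = i + b - 1)
theorem pvA_block (size : Int) :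
    ∀ (b : Nat), 1 ≤ b → ∀ (n : Nat) (i lev : Int),
      pvA_run size n i lev (i + (b : Int) - 1)
        = List.replicate (min b n) (pvA_rgb (lev % 3)) ++
          (if b ≤ n then
            pvA_run size (n - b) (i + b) (lev + 1) (i + (b : Int) - 1 + size ^ (lev + 1).toNat)
           else []) := by
  intro b
  induction b with
  | zero => intro h; omega
  | succ c ih =>
    intro _ n i lev
    cases n with
    | zero => simp [pvA_run]
    | succ k =>
      cases Nat.eq_zero_or_pos c with
      | inl hc0 =>
        subst hc0
        have hi : i + (1 : Int) - 1 = i := by ring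
        simp only [pvA_run]
        have hmin : min 1 (k + 1) = 1 := by omega
        have hle : 1 ≤ k + 1 := by omega
        simp [hle, hi]
      | inr hc1 =>
        have hne : i ≠ i + ((c : Int) + 1) - 1 := by
          have : (1 : Int) ≤ (c : Int) := by exact_mod_cast hc1
          omega
        simp only [pvA_run, Nat.cast_add, Nat.cast_one]
        rw [if_neg hne]
        have harg : i + ((c : Int) + 1) - 1 = (i + 1) + (c : Int) - 1 := by ring
        rw [harg, ih hc1 k (i + 1) lev]
        have hmin : min (c + 1) (k + 1) = (min c k) + 1 := by omega
        have e1 : k + 1 - (c + 1) = k - c := by omega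
        have e2 : i + ((c : Int) + 1) = i + 1 + (c : Int) := by ring
        by_cases hck : c ≤ k
        · rw [if_pos hck, if_pos (show c + 1 ≤ k + 1 by omega), hmin, e1, e2]
          simp [List.replicate_succ]
        · rw [if_neg hck, if_neg (show ¬ (c + 1 ≤ k + 1) by omega), hmin]
          simp [List.replicate_succ]

-- main correspondence: A's run on a fresh block boundary equals B's loop
theorem pvAB_main (size : Int) (hsize : 1 ≤ size) :
    ∀ (fuel : Nat) (n : Nat), n ≤ fuel → ∀ (i lev : Int), 0 ≤ lev →
      pvA_run size n i lev (i + size ^ lev.toNat - 1)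
        = pvB_loop size fuel (n : Int) lev [] := by
  intro fuel
  induction fuel with
  | zero =>
    intro n hn i lev _
    interval_cases n
    simp [pvA_run, pvB_loop]
  | succ f ih =>
    intro n hn i lev hlev
    cases n with
    | zero => simp [pvA_run, pvB_loop]
    | succ k =>
      have hposn : ((k : Int) + 1) > 0 := by positivity
      have hbpos : (1 : Int) ≤ size ^ lev.toNat := one_le_pow₀ hsize
      have hbNat : 1 ≤ (size ^ lev.toNat).toNat := by omega
      have hcast : ((size ^ lev.toNat).toNat : Int) = size ^ lev.toNat := by omega
      -- unfold B one step
      have hB : pvB_loop size (f + 1) ((k : Int) + 1) lev []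
          = List.replicate (min (size ^ lev.toNat) ((k : Int) + 1)).toNat (pvB_rgb (lev % 3))
            ++ pvB_loop size f (((k : Int) + 1) - min (size ^ lev.toNat) ((k : Int) + 1)) (lev + 1) [] := by
        rw [show pvB_loop size (f + 1) ((k : Int) + 1) lev []
            = pvB_loop size f (((k : Int) + 1) - min (size ^ lev.toNat) ((k : Int) + 1)) (lev + 1)
                ([] ++ List.replicate (min (size ^ lev.toNat) ((k : Int) + 1)).toNat (pvB_rgb (lev % 3)))
            from by simp [pvB_loop, hposn]]
        rw [pvB_loop_acc]
        simp
      push_cast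
      rw [hB]
      -- unfold A one block
      rw [← hcast, pvA_block size _ hbNat]
      set b := (size ^ lev.toNat).toNat with hb
      have hminInt : (min ((b : Int)) ((k : Int) + 1)).toNat = min b (k + 1) := by omega
      have hrep : pvA_rgb (lev % 3) = pvB_rgb (lev % 3) := rfl
      rw [hminInt, hrep]
      congr 1
      by_cases hble : b ≤ k + 1
      · rw [if_pos hble]
        have hmin2 : min ((b : Int)) ((k : Int) + 1) = (b : Int) := by omega
        rw [hmin2]
        have hrem : ((k : Int) + 1) - (b : Int) = ((k + 1 - b : Nat) : Int) := by
          push_cast [hble]; ring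
        rw [hrem]
        have hlev1 : (lev + 1).toNat = lev.toNat + 1 := by omega
        have htot : i + (b : Int) - 1 + size ^ (lev + 1).toNat
            = (i + (b : Int)) + size ^ (lev + 1).toNat - 1 := by ring
        rw [htot, hlev1]
        have := ih (k + 1 - b) (by omega) (i + (b : Int)) (lev + 1) (by omega)
        rw [hlev1] at this
        exact this
      · rw [if_neg hble]
        have hmin2 : min ((b : Int)) ((k : Int) + 1) = (k : Int) + 1 := by omega
        rw [hmin2]
        rw [pvB_loop_nonpos size f _ _ _ (by omega)]

theorem pvA_closed (sum size : Int) (hsum : 0 ≤ sum) :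
    get_color_arr sum size = pvA_run size sum.toNat 1 0 1 := by
  unfold get_color_arr
  have h : sum + 1 = (1 : Int) + (sum.toNat : Nat) := by omega
  rw [h, pvA_fold_run size sum.toNat 1 0 1 []]
  simp

-- ===== VERDICT (by name: the statement is the Claim_ definition above) =====
theorem get_color_arr_spec : Claim_equal_get_color_arr := by
  intro sum size _ hpre
  unfold Spec_get_color_arr get_color_arr_alt
  by_cases hsz : 1 ≤ size
  case neg =>
    have hs1 : sum ≤ 1 := hpre.resolve_left hsz
    by_cases hs0 : 0 < sum
    · have h1 : sum = 1 := by omega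
      subst h1
      unfold get_color_arr
      rw [PySem.List.pyRange_one_cons (by omega), PySem.List.pyRange_one_eq_nil (by omega)]
      norm_num [pvA_step, pvB_loop, pvA_rgb, pvB_rgb]
    · have hz : sum.toNat = 0 := by omega
      rw [hz]
      unfold get_color_arr
      rw [PySem.List.pyRange_one_eq_nil (by omega)]
      simp [pvB_loop]
  case pos =>
  rename_i hpre'
  clear hpre; have hpre := hsz
  by_cases hsum : 0 ≤ sum
  · rw [pvA_closed sum size hsum]
    have h1 : (1 : Int) = 1 + size ^ ((0 : Int)).toNat - 1 := by simp
    rw [show pvA_run size sum.toNat 1 0 1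
        = pvA_run size sum.toNat 1 0 (1 + size ^ ((0 : Int)).toNat - 1) from by rw [← h1]]
    rw [pvAB_main size hpre sum.toNat sum.toNat le_rfl 1 0 le_rfl]
    congr 1
    omega
  · have hz : sum.toNat = 0 := by omega
    rw [hz]
    unfold get_color_arr
    rw [PySem.List.pyRange_one_eq_nil (by omega)]
    simp [pvB_loop]
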